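-- pv_equiv track=rewrite | github.com/krk-san/AtCoder-Python | venv/ABC182/abc182_d.py | solve
-- ===== SOURCE A (Python) =====
-- def solve(N, A):
--     ret = 0
--     pos = 0
--
--     A_sum = [0] * (N+1)
--     A_sum_max = [0] * (N+1)
--
--     for i in range(N):
--         A_sum[i+1] = A_sum[i] + A[i]
--         A_sum_max[i+1] = max(A_sum[i+1], A_sum_max[i])
--
--     for i in range(N+1):
--         ret = max(pos+A_sum[i], pos+A_sum_max[i], ret)
--         pos += A_sum[i]
--     return ret
-- ===== SOURCE B (Python) =====
-- def solve(N, A):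
--     # Different algorithm: swap the order of maximisation.  The answer is
--     # max over k <= i of (pos_i + S_k), where S_k is the k-th prefix sum and
--     # pos_i the position before round i.  Instead of a running max of prefix
--     # sums (A's A_sum_max), compute the pos list forward, then sweep BACKWARD
--     # keeping a suffix max of positions and combining it with each S_k.
--     S = [0]
--     pos = [0]
--     for i in range(N):
--         pos.append(pos[-1] + S[-1])
--         S.append(S[-1] + A[i])
--     suff = pos[-1]
--     ans = 0
--     for k in range(len(S) - 1, -1, -1):
--         if pos[k] > suff:
--             suff = pos[k]
--         if S[k] + suff > ans:
--             ans = S[k] + suff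
--     return ans
-- ===== Notes on version B (the rewrite author's own statement) =====
-- stated objective: alternative
-- what changed: Swaps the order of maximisation: instead of A's running max of prefix sums combined forward with positions, B builds the position list forward and then sweeps backward with a suffix max of positions, combining it with each prefix sum (answer = max_{k<=i} pos_i + S_k).
import Mathlib
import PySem

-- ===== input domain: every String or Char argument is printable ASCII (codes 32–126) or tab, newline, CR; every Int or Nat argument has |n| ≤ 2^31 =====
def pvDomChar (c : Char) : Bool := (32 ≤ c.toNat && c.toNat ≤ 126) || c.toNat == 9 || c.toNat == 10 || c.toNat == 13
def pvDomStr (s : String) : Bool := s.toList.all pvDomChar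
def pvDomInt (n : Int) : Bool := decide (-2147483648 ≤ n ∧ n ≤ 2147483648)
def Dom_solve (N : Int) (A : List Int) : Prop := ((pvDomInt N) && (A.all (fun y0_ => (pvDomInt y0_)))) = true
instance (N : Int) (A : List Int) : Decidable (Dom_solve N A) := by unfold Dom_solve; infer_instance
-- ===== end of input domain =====

-- B swaps the order of maximisation: A combines a forward running max of prefix sums with
-- positions; B builds the position list forward and sweeps BACKWARD with a suffix max of
-- positions, combining it with each prefix sum.  Objective: alternative algorithm, same cost.

-- ===== PORT A =====
-- first loop: fill A_sum / A_sum_max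
def loop1A (N : Int) (A : List Int) : List Int × List Int :=
  let tabs := List.replicate (N + 1).toNat (0 : Int)
  (PySem.List.pyRange 0 N 1).foldl
    (fun (st : List Int × List Int) i =>
      let v := PySem.List.pyGetD st.1 i 0 + PySem.List.pyGetD A i 0
      let m := max v (PySem.List.pyGetD st.2 i 0)
      (PySem.List.pySetD st.1 (i + 1) v, PySem.List.pySetD st.2 (i + 1) m))
    (tabs, tabs)

-- second loop: (ret, pos)
def loop2A (st : List Int × List Int) (N : Int) : Int × Int :=
  (PySem.List.pyRange 0 (N + 1) 1).foldl
    (fun (rp : Int × Int) i =>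
      let r := max (rp.2 + PySem.List.pyGetD st.1 i 0)
                 (max (rp.2 + PySem.List.pyGetD st.2 i 0) rp.1)
      (r, rp.2 + PySem.List.pyGetD st.1 i 0))
    (0, 0)

def solve (N : Int) (A : List Int) : Int :=
  (loop2A (loop1A N A) N).1

-- ===== PORT B =====
-- forward loop: build S (prefix sums) and pos (positions); python's list.append is ++ [·],
-- xs[-1] on these always-nonempty lists is getLastD 0 (exact here since they are never empty)
def fwdB (N : Int) (A : List Int) : List Int × List Int :=
  (PySem.List.pyRange 0 N 1).foldl
    (fun (sp : List Int × List Int) i =>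
      (sp.1 ++ [sp.1.getLastD 0 + PySem.List.pyGetD A i 0],
       sp.2 ++ [sp.2.getLastD 0 + sp.1.getLastD 0]))
    ([0], [0])

-- backward loop over k = len(S)-1 .. 0: suffix max of pos combined with S[k]
def bwdB (S pos : List Int) : Int × Int :=
  (PySem.List.pyRange ((S.length : Int) - 1) (-1) (-1)).foldl
    (fun (sa : Int × Int) k =>
      let p := PySem.List.pyGetD pos k 0
      let suff := if sa.1 < p then p else sa.1
      let ans := if sa.2 < PySem.List.pyGetD S k 0 + suff then PySem.List.pyGetD S k 0 + suff else sa.2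
      (suff, ans))
    (pos.getLastD 0, 0)

def solve_alt (N : Int) (A : List Int) : Int :=
  let sp := fwdB N A
  (bwdB sp.1 sp.2).2

-- ===== PRECONDITION & SPEC =====
-- Pre_ excludes exactly the inputs where the Python A raises IndexError: 1 ≤ N but A shorter than N.
def Pre_solve (N : Int) (A : List Int) : Prop := N ≤ (A.length : Int) ∨ N < 0
instance (N : Int) (A : List Int) : Decidable (Pre_solve N A) := by unfold Pre_solve; infer_instance
def pvWitness_solve : Int × List Int := (3, [2, -1, 3])

def Spec_solve (N : Int) (A : List Int) (out : Int) : Prop := out = solve_alt N A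
instance (N : Int) (A : List Int) (out : Int) : Decidable (Spec_solve N A out) := by unfold Spec_solve; infer_instance

-- ===== CLAIM (what is proved, stated in full; the proofs are below) =====
def Claim_equal_solve : Prop := ∀ (N : Int) (A : List Int), Dom_solve N A → Pre_solve N A → Spec_solve N A (solve N A)

-- ===== LEMMAS AND PROOFS =====

-- prefix sum of the first k entries of A, its running maximum, and the position before round k
def pref (A : List Int) : Nat → Int
  | 0 => 0
  | k + 1 => pref A k + A.getD k 0

def mpre (A : List Int) : Nat → Int
  | 0 => 0
  | k + 1 => max (pref A (k + 1)) (mpre A k)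

def posf (A : List Int) : Nat → Int
  | 0 => 0
  | k + 1 => posf A k + pref A k

theorem pref_le_mpre (A : List Int) (k : Nat) : pref A k ≤ mpre A k := by
  cases k with
  | zero => exact le_refl 0
  | succ j => exact le_max_left _ _

theorem mpre_mono (A : List Int) (k m : Nat) (h : k ≤ m) : mpre A k ≤ mpre A m := by
  induction m with
  | zero => interval_cases k; exact le_refl _
  | succ j ih =>
    rcases Nat.lt_or_ge k (j + 1) with hlt | hge
    · exact le_trans (ih (by omega)) (le_max_right _ _)
    · have : k = j + 1 := by omega
      subst this; exact le_refl _

theorem pref_le_mpre_of_le (A : List Int) (k m : Nat) (h : k ≤ m) : pref A k ≤ mpre A m :=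
  le_trans (pref_le_mpre A k) (mpre_mono A k m h)

theorem mpre_exists (A : List Int) (i : Nat) : ∃ k, k ≤ i ∧ mpre A i = pref A k := by
  induction i with
  | zero => exact ⟨0, le_refl 0, rfl⟩
  | succ j ih =>
    obtain ⟨k, hk, he⟩ := ih
    rcases le_total (pref A (j + 1)) (mpre A j) with h | h
    · refine ⟨k, by omega, ?_⟩
      show max (pref A (j + 1)) (mpre A j) = pref A k
      rw [max_eq_right h, he]
    · refine ⟨j + 1, le_refl _, ?_⟩
      show max (pref A (j + 1)) (mpre A j) = pref A (j + 1)
      rw [max_eq_left h]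

-- reference second-loop state of A after processing i = 0 .. k-1: (ret, pos)
def refS (A : List Int) : Nat → Int × Int
  | 0 => (0, 0)
  | k + 1 =>
    let p := refS A k
    (max (p.2 + pref A k) (max (p.2 + mpre A k) p.1), p.2 + pref A k)

theorem refS_snd (A : List Int) (k : Nat) : (refS A k).2 = posf A k := by
  induction k with
  | zero => rfl
  | succ j ih => simp [refS, posf, ih]

-- A's answer in closed recursive form
def retA (A : List Int) : Nat → Int
  | 0 => 0
  | k + 1 => max (retA A k) (posf A k + mpre A k)

theorem refS_fst_eq_retA (A : List Int) (k : Nat) : (refS A k).1 = retA A k := by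
  induction k with
  | zero => rfl
  | succ j ih =>
    have hle := pref_le_mpre A j
    have hs := refS_snd A j
    show max ((refS A j).2 + pref A j) (max ((refS A j).2 + mpre A j) (refS A j).1)
        = max (retA A j) (posf A j + mpre A j)
    rw [hs, ih]
    omega

theorem retA_nonneg (A : List Int) (k : Nat) : 0 ≤ retA A (k + 1) := by
  induction k with
  | zero => show (0 : Int) ≤ max 0 (0 + 0); omega
  | succ j ih => exact le_trans ih (le_max_left _ _)

theorem retA_mono (A : List Int) (k m : Nat) (h : k ≤ m) : retA A k ≤ retA A m := by
  induction m with
  | zero => interval_cases k; exact le_refl _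
  | succ j ih =>
    rcases Nat.lt_or_ge k (j + 1) with hlt | hge
    · exact le_trans (ih (by omega)) (le_max_left _ _)
    · have : k = j + 1 := by omega
      subst this; exact le_refl _

theorem term_le_retA (A : List Int) (i m : Nat) (h : i ≤ m) :
    posf A i + mpre A i ≤ retA A (m + 1) :=
  le_trans (le_max_right (retA A i) _) (retA_mono A (i + 1) (m + 1) (by omega))

-- B's backward loop in recursive form, and its answer component
def bres (A : List Int) : Nat → Int → Int → Int × Int
  | 0, suff, ans =>
    let s := max suff (posf A 0)
    (s, max ans (pref A 0 + s))
  | j + 1, suff, ans =>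
    let s := max suff (posf A (j + 1))
    bres A j s (max ans (pref A (j + 1) + s))

def bval (A : List Int) : Nat → Int → Int
  | 0, suff => pref A 0 + max suff (posf A 0)
  | j + 1, suff =>
    let s := max suff (posf A (j + 1))
    max (pref A (j + 1) + s) (bval A j s)

theorem bres_snd (A : List Int) (j : Nat) : ∀ suff ans,
    (bres A j suff ans).2 = max ans (bval A j suff) := by
  induction j with
  | zero => intro suff ans; rfl
  | succ i ih =>
    intro suff ans
    show (bres A i _ (max ans _)).2 = _
    rw [ih]
    simp only [bval]
    omega

-- lower bounds for bval
theorem bval_ge (A : List Int) (j : Nat) : ∀ suff,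
    (∀ k i, k ≤ i → i ≤ j → pref A k + posf A i ≤ bval A j suff) ∧
    (∀ k, k ≤ j → pref A k + suff ≤ bval A j suff) := by
  induction j with
  | zero =>
    intro suff
    constructor
    · intro k i hk hi
      interval_cases i; interval_cases k
      show pref A 0 + posf A 0 ≤ pref A 0 + max suff (posf A 0)
      omega
    · intro k hk; interval_cases k
      show pref A 0 + suff ≤ pref A 0 + max suff (posf A 0)
      omega
  | succ j ih =>
    intro suff
    have hs : posf A (j + 1) ≤ max suff (posf A (j + 1)) := le_max_right _ _
    have hsu : suff ≤ max suff (posf A (j + 1)) := le_max_left _ _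
    obtain ⟨ih1, ih2⟩ := ih (max suff (posf A (j + 1)))
    constructor
    · intro k i hk hi
      rcases Nat.lt_or_ge i (j + 1) with hlt | hge
      · exact le_trans (ih1 k i hk (by omega)) (le_max_right _ _)
      · have : i = j + 1 := by omega
        subst this
        rcases Nat.lt_or_ge k (j + 1) with hklt | hkge
        · have := ih2 k (by omega)
          calc pref A k + posf A (j + 1) ≤ pref A k + max suff (posf A (j + 1)) := by omega
            _ ≤ bval A j _ := this
            _ ≤ bval A (j + 1) suff := le_max_right _ _
        · have : k = j + 1 := by omega
          subst this
          exact le_trans (by omega) (le_max_left (pref A (j+1) + max suff (posf A (j+1))) _)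
    · intro k hk
      rcases Nat.lt_or_ge k (j + 1) with hklt | hkge
      · exact le_trans (le_trans (by omega) (ih2 k (by omega))) (le_max_right _ _)
      · have : k = j + 1 := by omega
        subst this
        exact le_trans (by omega) (le_max_left (pref A (j+1) + max suff (posf A (j+1))) _)

-- upper bound for bval
theorem bval_le (A : List Int) (j : Nat) : ∀ suff (R : Int),
    (∀ i, i ≤ j → posf A i + mpre A i ≤ R) →
    (∀ k, k ≤ j → pref A k + suff ≤ R) → bval A j suff ≤ R := by
  induction j with
  | zero =>
    intro suff R h1 h2
    have ha := h1 0 (le_refl 0)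
    have hb := h2 0 (le_refl 0)
    show pref A 0 + max suff (posf A 0) ≤ R
    have : pref A 0 ≤ mpre A 0 := pref_le_mpre A 0
    omega
  | succ j ih =>
    intro suff R h1 h2
    show max (pref A (j + 1) + max suff (posf A (j + 1))) (bval A j (max suff (posf A (j + 1)))) ≤ R
    have hp : pref A (j + 1) ≤ mpre A (j + 1) := pref_le_mpre A (j + 1)
    have ha := h1 (j + 1) (le_refl _)
    have hb := h2 (j + 1) (le_refl _)
    have hrest : bval A j (max suff (posf A (j + 1))) ≤ R := by
      apply ih
      · intro i hi; exact h1 i (by omega)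
      · intro k hk
        have hkm : pref A k ≤ mpre A (j + 1) := pref_le_mpre_of_le A k (j + 1) (by omega)
        have := h2 k (by omega)
        omega
    omega

-- the central identity: B's backward value equals A's forward value
theorem bval_eq_retA (A : List Int) (n : Nat) :
    max 0 (bval A n (posf A n)) = retA A (n + 1) := by
  apply le_antisymm
  · apply max_le (retA_nonneg A n)
    apply bval_le
    · intro i hi; exact term_le_retA A i n hi
    · intro k hk
      have : pref A k ≤ mpre A n := pref_le_mpre_of_le A k n hk
      have := term_le_retA A n n (le_refl n)
      omega
  · -- retA (n+1) ≤ max 0 (bval n (posf n))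
    have key : ∀ m, m ≤ n → retA A (m + 1) ≤ max 0 (bval A n (posf A n)) := by
      intro m
      induction m with
      | zero =>
        intro _
        show max (retA A 0) (posf A 0 + mpre A 0) ≤ _
        have : (max (retA A 0) (posf A 0 + mpre A 0)) = 0 := by
          show max 0 (0 + 0) = 0; omega
        rw [this]; exact le_max_left _ _
      | succ j ih =>
        intro hj
        show max (retA A (j + 1)) (posf A (j + 1) + mpre A (j + 1)) ≤ _
        have h1 := ih (by omega)
        obtain ⟨k, hk, he⟩ := mpre_exists A (j + 1)
        obtain ⟨hg1, hg2⟩ := bval_ge A n (posf A n)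
        have h2 : posf A (j + 1) + mpre A (j + 1) ≤ bval A n (posf A n) := by
          rw [he, add_comm]
          exact hg1 k (j + 1) hk (by omega)
        have := le_max_right (0 : Int) (bval A n (posf A n))
        omega
    exact key n (le_refl n)

-- partially filled tables of A's first loop
def tabP (A : List Int) (n k : Nat) : List Int :=
  (List.range (k + 1)).map (pref A) ++ List.replicate (n - k) 0

def tabM (A : List Int) (n k : Nat) : List Int :=
  (List.range (k + 1)).map (mpre A) ++ List.replicate (n - k) 0

theorem pyRange_zero_succ (k : Nat) :
    PySem.List.pyRange 0 (((k + 1 : Nat)) : Int) 1 = PySem.List.pyRange 0 (k : Int) 1 ++ [(k : Int)] := by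
  rw [PySem.List.pyRange_one, PySem.List.pyRange_one]
  have h1 : (((k + 1 : Nat) : Int) - 0).toNat = k + 1 := by omega
  have h2 : (((k : Nat) : Int) - 0).toNat = k := by omega
  rw [h1, h2, List.range_succ]
  simp

theorem getD_map_range_append {f : Nat → Int} {m : Nat} (r : List Int) (k : Nat) (hk : k < m) :
    ((List.range m).map f ++ r).getD k 0 = f k := by
  rw [List.getD_eq_getElem?_getD, List.getElem?_append_left (by simpa using hk)]
  simp [hk]

theorem tabP_getD (A : List Int) (n k j : Nat) (h : j ≤ k) : (tabP A n k).getD j 0 = pref A j :=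
  getD_map_range_append _ j (by omega)

theorem tabM_getD (A : List Int) (n k j : Nat) (h : j ≤ k) : (tabM A n k).getD j 0 = mpre A j :=
  getD_map_range_append _ j (by omega)

theorem set_map_range_append {f : Nat → Int} (k m : Nat) :
    ((List.range (k + 1)).map f ++ List.replicate (m + 1) 0).set (k + 1) (f (k + 1))
      = (List.range (k + 2)).map f ++ List.replicate m 0 := by
  rw [List.set_append_right _ _ (by simp)]
  simp [List.range_succ, List.replicate_succ]

theorem tabP_set (A : List Int) (n k : Nat) (h : k < n) :
    (tabP A n k).set (k + 1) (pref A (k + 1)) = tabP A n (k + 1) := by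
  unfold tabP
  have : n - k = (n - (k + 1)) + 1 := by omega
  rw [this, set_map_range_append]

theorem tabM_set (A : List Int) (n k : Nat) (h : k < n) :
    (tabM A n k).set (k + 1) (mpre A (k + 1)) = tabM A n (k + 1) := by
  unfold tabM
  have : n - k = (n - (k + 1)) + 1 := by omega
  rw [this, set_map_range_append]

-- A's first loop builds the prefix tables
theorem loop1_inv (A : List Int) (n : Nat) (k : Nat) (hk : k ≤ n) :
    (PySem.List.pyRange 0 (k : Int) 1).foldl
      (fun (st : List Int × List Int) i =>
        let v := PySem.List.pyGetD st.1 i 0 + PySem.List.pyGetD A i 0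
        let m := max v (PySem.List.pyGetD st.2 i 0)
        (PySem.List.pySetD st.1 (i + 1) v, PySem.List.pySetD st.2 (i + 1) m))
      (List.replicate (n + 1) 0, List.replicate (n + 1) 0)
      = (tabP A n k, tabM A n k) := by
  induction k with
  | zero =>
    simp [tabP, tabM, pref, mpre, List.replicate_succ]
  | succ j ih =>
    rw [pyRange_zero_succ, List.foldl_append, ih (by omega)]
    simp only [List.foldl_cons, List.foldl_nil]
    have hgA : PySem.List.pyGetD A (j : Int) 0 = A.getD j 0 := by
      simp [PySem.List.pyGetD_natCast]
    have hgP : PySem.List.pyGetD (tabP A n j) (j : Int) 0 = pref A j := by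
      rw [PySem.List.pyGetD_natCast]; exact tabP_getD A n j j (le_refl j)
    have hgM : PySem.List.pyGetD (tabM A n j) (j : Int) 0 = mpre A j := by
      rw [PySem.List.pyGetD_natCast]; exact tabM_getD A n j j (le_refl j)
    have hcast : (j : Int) + 1 = ((j + 1 : Nat) : Int) := by push_cast; ring
    simp only [hgA, hgP, hgM, hcast, PySem.List.pySetD_natCast]
    have hp : pref A j + A.getD j 0 = pref A (j + 1) := rfl
    have hm : max (pref A (j + 1)) (mpre A j) = mpre A (j + 1) := rfl
    rw [hp, hm, tabP_set A n j (by omega), tabM_set A n j (by omega)]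

-- A's second loop follows refS
theorem loop2_inv (A : List Int) (n : Nat) (k : Nat) (hk : k ≤ n + 1) :
    (PySem.List.pyRange 0 (k : Int) 1).foldl
      (fun (rp : Int × Int) i =>
        let r := max (rp.2 + PySem.List.pyGetD (tabP A n n) i 0)
                   (max (rp.2 + PySem.List.pyGetD (tabM A n n) i 0) rp.1)
        (r, rp.2 + PySem.List.pyGetD (tabP A n n) i 0))
      (0, 0)
      = refS A k := by
  induction k with
  | zero => simp [refS]
  | succ j ih =>
    rw [pyRange_zero_succ, List.foldl_append, ih (by omega)]
    simp only [List.foldl_cons, List.foldl_nil]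
    have hgP : PySem.List.pyGetD (tabP A n n) (j : Int) 0 = pref A j := by
      rw [PySem.List.pyGetD_natCast]; exact tabP_getD A n n j (by omega)
    have hgM : PySem.List.pyGetD (tabM A n n) (j : Int) 0 = mpre A j := by
      rw [PySem.List.pyGetD_natCast]; exact tabM_getD A n n j (by omega)
    simp only [hgP, hgM, refS]

theorem loop1A_eq (A : List Int) (n : Nat) :
    loop1A (n : Int) A = (tabP A n n, tabM A n n) := by
  unfold loop1A
  have ht : ((n : Int) + 1).toNat = n + 1 := by omega
  simp only [ht]
  exact loop1_inv A n n (le_refl n)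

theorem solve_nonneg_eq (n : Nat) (A : List Int) : solve (n : Int) A = (refS A (n + 1)).1 := by
  unfold solve
  rw [loop1A_eq]
  unfold loop2A
  have hc : ((n : Int) + 1) = ((n + 1 : Nat) : Int) := by push_cast; ring
  rw [hc, loop2_inv A n (n + 1) (le_refl _)]

-- ===== B-side lemmas =====

def Smap (A : List Int) (k : Nat) : List Int := (List.range (k + 1)).map (pref A)
def Pmap (A : List Int) (k : Nat) : List Int := (List.range (k + 1)).map (posf A)

theorem lastD_map_range (f : Nat → Int) (k : Nat) :
    ((List.range (k + 1)).map f).getLastD 0 = f k := by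
  rw [List.range_succ, List.map_append]
  simp

theorem fwd_inv (A : List Int) (k : Nat) :
    (PySem.List.pyRange 0 (k : Int) 1).foldl
      (fun (sp : List Int × List Int) i =>
        (sp.1 ++ [sp.1.getLastD 0 + PySem.List.pyGetD A i 0],
         sp.2 ++ [sp.2.getLastD 0 + sp.1.getLastD 0]))
      ([0], [0])
      = (Smap A k, Pmap A k) := by
  induction k with
  | zero => simp [Smap, Pmap, List.range_succ, pref, posf]
  | succ j ih =>
    rw [pyRange_zero_succ, List.foldl_append, ih]
    simp only [List.foldl_cons, List.foldl_nil]
    have hgA : PySem.List.pyGetD A (j : Int) 0 = A.getD j 0 := by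
      simp [PySem.List.pyGetD_natCast]
    have hS : (Smap A j).getLastD 0 = pref A j := lastD_map_range _ j
    have hP : (Pmap A j).getLastD 0 = posf A j := lastD_map_range _ j
    simp only [hgA, hS, hP]
    have h1 : pref A j + A.getD j 0 = pref A (j + 1) := rfl
    have h2 : posf A j + pref A j = posf A (j + 1) := rfl
    rw [h1, h2]
    unfold Smap Pmap
    rw [List.range_succ (n := j + 1), List.map_append, List.map_append]
    rfl

theorem ifmax (a b : Int) : (if a < b then b else a) = max a b := by
  rw [max_def]; split_ifs <;> omega

theorem pyRange_countdown (j : Nat) :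
    PySem.List.pyRange (j : Int) (-1) (-1) = (j : Int) :: PySem.List.pyRange ((j : Int) - 1) (-1) (-1) :=
  PySem.List.pyRange_neg_one_cons (by omega)

theorem getD_map_range' (f : Nat → Int) (m k : Nat) (hk : k < m) :
    ((List.range m).map f).getD k 0 = f k := by
  have := getD_map_range_append (f := f) (m := m) [] k hk
  simpa using this

theorem bwdfun_eq (A : List Int) (n : Nat) :
    (fun (sa : Int × Int) k =>
      let p := PySem.List.pyGetD (Pmap A n) k 0
      let suff := if sa.1 < p then p else sa.1
      let ans := if sa.2 < PySem.List.pyGetD (Smap A n) k 0 + suff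
                 then PySem.List.pyGetD (Smap A n) k 0 + suff else sa.2
      ((suff, ans) : Int × Int))
    = (fun (sa : Int × Int) k =>
      (max sa.1 (PySem.List.pyGetD (Pmap A n) k 0),
       max sa.2 (PySem.List.pyGetD (Smap A n) k 0 + max sa.1 (PySem.List.pyGetD (Pmap A n) k 0)))) := by
  funext sa k
  simp only [ifmax]

theorem bwd_inv (A : List Int) (n : Nat) (j : Nat) (hj : j ≤ n) : ∀ suff ans,
    (PySem.List.pyRange (j : Int) (-1) (-1)).foldl
      (fun (sa : Int × Int) k =>
        (max sa.1 (PySem.List.pyGetD (Pmap A n) k 0),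
         max sa.2 (PySem.List.pyGetD (Smap A n) k 0 + max sa.1 (PySem.List.pyGetD (Pmap A n) k 0))))
      (suff, ans)
      = bres A j suff ans := by
  induction j with
  | zero =>
    intro suff ans
    have h0 : PySem.List.pyRange ((0 : Nat) : Int) (-1) (-1) = [(0 : Int)] := by
      rw [PySem.List.pyRange_neg_one_cons (by omega), show ((0:Nat):Int) - 1 = -1 by omega,
        PySem.List.pyRange_neg_one_eq_nil (by omega)]
      norm_num
    have hp : PySem.List.pyGetD (Pmap A n) (0 : Int) 0 = posf A 0 := by
      have : PySem.List.pyGetD (Pmap A n) ((0 : Nat) : Int) 0 = posf A 0 := by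
        rw [PySem.List.pyGetD_natCast]; exact getD_map_range' _ _ 0 (by omega)
      simpa using this
    have hs : PySem.List.pyGetD (Smap A n) (0 : Int) 0 = pref A 0 := by
      have : PySem.List.pyGetD (Smap A n) ((0 : Nat) : Int) 0 = pref A 0 := by
        rw [PySem.List.pyGetD_natCast]; exact getD_map_range' _ _ 0 (by omega)
      simpa using this
    rw [h0]
    simp only [List.foldl_cons, List.foldl_nil, hp, hs]
    rfl
  | succ j ih =>
    intro suff ans
    rw [pyRange_countdown]
    have hc : ((j + 1 : Nat) : Int) - 1 = ((j : Nat) : Int) := by push_cast; ring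
    rw [hc]
    have hp : PySem.List.pyGetD (Pmap A n) ((j + 1 : Nat) : Int) 0 = posf A (j + 1) := by
      rw [PySem.List.pyGetD_natCast]; exact getD_map_range' _ _ (j + 1) (by omega)
    have hs : PySem.List.pyGetD (Smap A n) ((j + 1 : Nat) : Int) 0 = pref A (j + 1) := by
      rw [PySem.List.pyGetD_natCast]; exact getD_map_range' _ _ (j + 1) (by omega)
    simp only [List.foldl_cons, hp, hs]
    rw [ih (by omega)]
    rfl

-- negative N: both ports return 0
theorem range_neg (b : Int) (hb : b ≤ 0) : PySem.List.pyRange 0 b 1 = [] := by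
  rw [PySem.List.pyRange_one]
  have h0 : (b - 0).toNat = 0 := by omega
  rw [h0]
  simp

theorem solve_neg (N : Int) (A : List Int) (h : N < 0) : solve N A = 0 := by
  unfold solve loop1A loop2A
  rw [range_neg N (by omega), range_neg (N + 1) (by omega)]
  rfl

theorem bwdB_single : bwdB [0] [0] = (0, 0) := by
  unfold bwdB
  rw [show ((([(0:Int)] : List Int).length : Int) - 1) = 0 by simp,
    PySem.List.pyRange_neg_one_cons (by omega), PySem.List.pyRange_neg_one_eq_nil (by omega)]
  rfl

theorem solve_alt_neg (N : Int) (A : List Int) (h : N < 0) : solve_alt N A = 0 := by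
  unfold solve_alt fwdB
  rw [range_neg N (by omega)]
  show (bwdB [0] [0]).2 = 0
  rw [bwdB_single]

theorem fwdB_eq (A : List Int) (n : Nat) : fwdB (n : Int) A = (Smap A n, Pmap A n) := by
  unfold fwdB
  exact fwd_inv A n

theorem solve_alt_nonneg_eq (n : Nat) (A : List Int) :
    solve_alt (n : Int) A = max 0 (bval A n (posf A n)) := by
  show (bwdB (fwdB (n : Int) A).1 (fwdB (n : Int) A).2).2 = _
  rw [fwdB_eq]
  show (bwdB (Smap A n) (Pmap A n)).2 = _
  unfold bwdB
  rw [bwdfun_eq A n]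
  have hlen : (((Smap A n).length : Int)) - 1 = (n : Int) := by
    simp [Smap]
  have hlast : (Pmap A n).getLastD 0 = posf A n := lastD_map_range _ n
  rw [hlen, hlast, bwd_inv A n n (le_refl n), bres_snd]

-- ===== VERDICT (by name: the statement is the Claim_ definition above) =====
theorem solve_spec : Claim_equal_solve := by
  intro N A _ _
  unfold Spec_solve
  by_cases h : 0 ≤ N
  · obtain ⟨n, rfl⟩ : ∃ n : Nat, N = (n : Int) := ⟨N.toNat, by omega⟩
    rw [solve_nonneg_eq, solve_alt_nonneg_eq, refS_fst_eq_retA, bval_eq_retA]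
  · rw [solve_neg N A (by omega), solve_alt_neg N A (by omega)]
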